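-- pv_equiv track=rewrite | github.com/gaurishgarg/Psychophysics_Adaptive_Staircase_Method | Experiment_Code_Python_Source_File.py | find_transition_points
-- ===== SOURCE A (Python) =====
-- def find_transition_points(frequency_array):
--     # Initialize variables to track direction and transition points
--     direction = None  # 'up', 'down', or None (initial state)
--     transition_points = []
--
--     # Iterate through the frequency array to find transitions
--     for i in range(1, len(frequency_array)):
--         current_frequency = frequency_array[i]
--         previous_frequency = frequency_array[i - 1]
--
--         if current_frequency > previous_frequency:
--             new_direction = 'up'
--         elif current_frequency < previous_frequency:
--             new_direction = 'down'
--         else: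
--             new_direction = direction  # Use the previous direction for repeated values
--
--         if direction is None:
--             direction = new_direction
--         elif direction != new_direction:
--             # Direction changed, record the transition point
--             transition_points.append(previous_frequency)
--             direction = new_direction
--
--     # Print the transition points
--     return transition_points
-- ===== SOURCE B (Python) =====
-- def find_transition_points(frequency_array):
--     # Pass 1: compress to the non-flat steps, keeping (value before the step, sign).
--     steps = []
--     for prev, cur in zip(frequency_array, frequency_array[1:]):
--         if cur != prev:
--             steps.append((prev, 1 if cur > prev else -1))
--     # Pass 2: a sign change in the compressed list is a transition point.
--     result = []
--     prev_sign = None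
--     for value, sign in steps:
--         if prev_sign is not None and sign != prev_sign:
--             result.append(value)
--         prev_sign = sign
--     return result
-- ===== Notes on version B (the rewrite author's own statement) =====
-- stated objective: alternative
-- what changed: Replaces the single stateful scan carrying an 'up'/'down'/None direction through plateaus by two passes: first compress the sequence to the non-flat steps as (value, sign) pairs (plateaus disappear), then detect sign changes in that compressed list.
import Mathlib
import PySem

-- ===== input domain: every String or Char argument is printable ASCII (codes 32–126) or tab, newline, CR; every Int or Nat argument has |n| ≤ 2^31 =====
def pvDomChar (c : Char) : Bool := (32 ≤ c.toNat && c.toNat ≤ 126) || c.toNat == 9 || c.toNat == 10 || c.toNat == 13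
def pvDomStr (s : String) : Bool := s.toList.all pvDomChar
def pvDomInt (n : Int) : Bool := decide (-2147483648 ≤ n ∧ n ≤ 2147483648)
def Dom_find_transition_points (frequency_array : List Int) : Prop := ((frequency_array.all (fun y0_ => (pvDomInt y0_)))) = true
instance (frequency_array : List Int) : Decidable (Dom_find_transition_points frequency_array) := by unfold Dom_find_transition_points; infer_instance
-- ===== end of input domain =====

-- B replaces A's single stateful 'up'/'down'/None scan by two passes: compress to non-flat
-- steps as (value, sign) pairs, then detect sign changes; same O(n) cost (objective: alternative).


-- ===== PORT A =====
-- A's loop over i = 1 .. len-1 reads exactly (a[i-1], a[i]); ported as a recursion carrying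
-- the previous element, the 'direction' state ('up'/'down'/None) and the accumulator.
def ftpLoopA (direction : Option String) (acc : List Int) (prev : Int) : List Int → List Int
  | [] => acc
  | cur :: rest =>
    let new_direction : Option String :=
      if cur > prev then some "up"
      else if cur < prev then some "down"
      else direction
    match direction with
    | none => ftpLoopA new_direction acc cur rest
    | some _ =>
      if direction ≠ new_direction then
        ftpLoopA new_direction (acc ++ [prev]) cur rest
      else
        ftpLoopA new_direction acc cur rest

def find_transition_points (frequency_array : List Int) : List Int :=
  match frequency_array with
  | [] => []
  | x :: rest => ftpLoopA none [] x rest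

-- ===== PORT B =====
-- Pass 1 of Source B: compress adjacent non-flat steps to (previous value, sign) pairs.
def ftpSteps (prev : Int) : List Int → List (Int × Int)
  | [] => []
  | cur :: rest =>
    (if cur ≠ prev then [(prev, if cur > prev then (1 : Int) else -1)] else []) ++ ftpSteps cur rest

-- Pass 2 of Source B: emit the value wherever the sign differs from the previous sign.
def ftpScan (prevSign : Option Int) : List (Int × Int) → List Int
  | [] => []
  | (value, sign) :: rest =>
    (match prevSign with
     | none => []
     | some p => if sign ≠ p then [value] else []) ++ ftpScan (some sign) rest

def find_transition_points_alt (frequency_array : List Int) : List Int :=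
  match frequency_array with
  | [] => []
  | x :: rest => ftpScan none (ftpSteps x rest)

-- ===== PRECONDITION & SPEC =====
def Spec_find_transition_points (frequency_array : List Int) (out : List Int) : Prop := out = find_transition_points_alt frequency_array
instance (frequency_array : List Int) (out : List Int) : Decidable (Spec_find_transition_points frequency_array out) := by unfold Spec_find_transition_points; infer_instance

-- ===== CLAIM (what is proved, stated in full; the proofs are below) =====
def Claim_equal_find_transition_points : Prop := ∀ (frequency_array : List Int), Dom_find_transition_points frequency_array → Spec_find_transition_points frequency_array (find_transition_points frequency_array)

-- ===== LEMMAS AND PROOFS =====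

-- A's accumulator factors out.
theorem ftpLoopA_acc (l : List Int) : ∀ (d : Option String) (acc : List Int) (prev : Int),
    ftpLoopA d acc prev l = acc ++ ftpLoopA d [] prev l := by
  induction l with
  | nil => intro d acc prev; simp [ftpLoopA]
  | cons c rest ih =>
    intro d acc prev
    simp only [ftpLoopA]
    match d with
    | none => exact ih _ acc c
    | some s =>
      by_cases h : (some s : Option String) ≠
          (if c > prev then some "up" else if c < prev then some "down" else some s)
      · simp only [if_pos h, List.nil_append]
        rw [ih _ (acc ++ [prev]) c, ih _ [prev] c, List.append_assoc]
      · simp only [if_neg h]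
        exact ih _ acc c

-- Correspondence between A's direction strings and B's signs.
def ftpRel (d : Option String) (s : Option Int) : Prop :=
  (d = none ∧ s = none) ∨ (d = some "up" ∧ s = some 1) ∨ (d = some "down" ∧ s = some (-1))

theorem ftpLoopA_eq_scan (l : List Int) : ∀ (d : Option String) (s : Option Int) (prev : Int),
    ftpRel d s → ftpLoopA d [] prev l = ftpScan s (ftpSteps prev l) := by
  induction l with
  | nil => intro d s prev _; simp [ftpLoopA, ftpSteps, ftpScan]
  | cons c rest ih =>
    intro d s prev hrel
    rcases lt_trichotomy prev c with hlt | heq | hgt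
    · -- step up: new_direction = "up", sign = 1
      have hc : c ≠ prev := by omega
      have hsteps : ftpSteps prev (c :: rest) = (prev, 1) :: ftpSteps c rest := by
        simp [ftpSteps, hc, hlt]
      have ihup := ih (some "up") (some 1) c (Or.inr (Or.inl ⟨rfl, rfl⟩))
      rw [hsteps]
      rcases hrel with ⟨hd, hs⟩ | ⟨hd, hs⟩ | ⟨hd, hs⟩ <;> subst hd <;> subst hs <;>
        simp only [ftpLoopA, gt_iff_lt, if_pos hlt, ftpScan]
      · simpa using ihup
      · simpa using ihup
      · rw [if_pos (by simp : (some "down" : Option String) ≠ some "up"),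
          if_pos (by decide : (1 : Int) ≠ -1), ftpLoopA_acc, List.nil_append, ihup]
    · -- plateau: everything carried through unchanged
      subst heq
      have hsteps : ftpSteps prev (prev :: rest) = ftpSteps prev rest := by
        simp [ftpSteps]
      rw [hsteps]
      rcases hrel with ⟨hd, hs⟩ | ⟨hd, hs⟩ | ⟨hd, hs⟩ <;> subst hd <;> subst hs <;>
        simp only [ftpLoopA, gt_iff_lt, lt_irrefl, if_false]
      · exact ih none none prev (Or.inl ⟨rfl, rfl⟩)
      · simpa using ih (some "up") (some 1) prev (Or.inr (Or.inl ⟨rfl, rfl⟩))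
      · simpa using ih (some "down") (some (-1)) prev (Or.inr (Or.inr ⟨rfl, rfl⟩))
    · -- step down: new_direction = "down", sign = -1
      have hc : c ≠ prev := by omega
      have hnlt : ¬ prev < c := by omega
      have hsteps : ftpSteps prev (c :: rest) = (prev, -1) :: ftpSteps c rest := by
        simp [ftpSteps, hc, hnlt]
      have ihdn := ih (some "down") (some (-1)) c (Or.inr (Or.inr ⟨rfl, rfl⟩))
      rw [hsteps]
      rcases hrel with ⟨hd, hs⟩ | ⟨hd, hs⟩ | ⟨hd, hs⟩ <;> subst hd <;> subst hs <;>
        simp only [ftpLoopA, gt_iff_lt, if_neg hnlt, if_pos hgt, ftpScan]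
      · simpa using ihdn
      · rw [if_pos (by simp : (some "up" : Option String) ≠ some "down"),
          if_pos (by decide : (-1 : Int) ≠ 1), ftpLoopA_acc, List.nil_append, ihdn]
      · simpa using ihdn

-- ===== VERDICT (by name: the statement is the Claim_ definition above) =====
theorem find_transition_points_spec : Claim_equal_find_transition_points := by
  intro fa _
  unfold Spec_find_transition_points find_transition_points find_transition_points_alt
  match fa with
  | [] => rfl
  | x :: rest => exact ftpLoopA_eq_scan rest none none x (Or.inl ⟨rfl, rfl⟩)
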